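-- pv_equiv track=rewrite | github.com/henrique-m-ribeiro/framework-v6-mvp | rag/analyze_existing_structure.py | categorize_tables
-- ===== SOURCE A (Python) =====
-- from typing import Dict, List, Any
--
-- def categorize_tables(tables: List[str]) -> Dict[str, List[str]]:
--     """Categoriza as tabelas por tipo."""
--
--     categories = {
--         'memory': [],
--         'learning': [],
--         'indicators': [],
--         'infrastructure': [],
--         'other': []
--     }
--
--     for table in tables:
--         if '_memory' in table:
--             categories['memory'].append(table)
--         elif '_learning' in table:
--             categories['learning'].append(table)
--         elif '_indicators' in table or table == 'indicator_metadata':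
--             categories['indicators'].append(table)
--         elif table in ['territories', 'spatial_relations', 'audit_trail', 'knowledge_base']:
--             categories['infrastructure'].append(table)
--         else:
--             categories['other'].append(table)
--
--     return categories
-- ===== SOURCE B (Python) =====
-- def categorize_tables(tables):
--     """Categoriza as tabelas por tipo (staged sieve version: peel off each
--     category with filters over the remaining tables, in priority order)."""
--     infra = ('territories', 'spatial_relations', 'audit_trail', 'knowledge_base')
--     memory = [t for t in tables if '_memory' in t]
--     rest = [t for t in tables if '_memory' not in t]
--     learning = [t for t in rest if '_learning' in t]
--     rest = [t for t in rest if '_learning' not in t]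
--     indicators = [t for t in rest if '_indicators' in t or t == 'indicator_metadata']
--     rest = [t for t in rest if '_indicators' not in t and t != 'indicator_metadata']
--     infrastructure = [t for t in rest if t in infra]
--     other = [t for t in rest if t not in infra]
--     return {'memory': memory, 'learning': learning, 'indicators': indicators,
--             'infrastructure': infrastructure, 'other': other}
-- ===== Notes on version B (the rewrite author's own statement) =====
-- stated objective: alternative
-- what changed: Replaces the single dispatch loop that appends each table into a mutable dict of buckets by a staged sieve: successive filter passes peel off each category from the remaining tables in priority order, so the result dict is built at the end from five independently computed lists with no per-element dispatch or dict mutation.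
import Mathlib
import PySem

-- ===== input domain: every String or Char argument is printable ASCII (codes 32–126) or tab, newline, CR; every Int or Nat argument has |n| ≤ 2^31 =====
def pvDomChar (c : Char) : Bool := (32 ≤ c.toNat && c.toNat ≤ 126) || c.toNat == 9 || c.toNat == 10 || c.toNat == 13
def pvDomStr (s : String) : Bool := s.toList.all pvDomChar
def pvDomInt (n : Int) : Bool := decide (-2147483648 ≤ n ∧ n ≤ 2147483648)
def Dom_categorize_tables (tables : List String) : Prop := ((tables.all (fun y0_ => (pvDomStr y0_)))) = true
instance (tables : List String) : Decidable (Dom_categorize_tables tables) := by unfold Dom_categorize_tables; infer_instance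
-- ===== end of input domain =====

-- B replaces A's single dispatch loop into mutable dict buckets by a staged sieve of filter passes, one per category in priority order; alternative decomposition, same cost.


-- ===== PORT A =====
def pvInitA : PySem.Dict String (List String) :=
  ((((PySem.Dict.empty.insert "memory" []).insert "learning" []).insert
      "indicators" []).insert "infrastructure" []).insert "other" []

def pvStepA (cats : PySem.Dict String (List String)) (table : String) :
    PySem.Dict String (List String) :=
  if PySem.Str.isIn "_memory" table then cats.modify "memory" [] (· ++ [table])
  else if PySem.Str.isIn "_learning" table then cats.modify "learning" [] (· ++ [table])
  else if PySem.Str.isIn "_indicators" table || table == "indicator_metadata" then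
    cats.modify "indicators" [] (· ++ [table])
  else if ["territories", "spatial_relations", "audit_trail", "knowledge_base"].contains table then
    cats.modify "infrastructure" [] (· ++ [table])
  else cats.modify "other" [] (· ++ [table])

def categorize_tables (tables : List String) : List (String × List String) :=
  (tables.foldl pvStepA pvInitA).items

-- ===== PORT B =====
def pvInfra : List String := ["territories", "spatial_relations", "audit_trail", "knowledge_base"]

def categorize_tables_alt (tables : List String) : List (String × List String) :=
  let memory := tables.filter (fun t => PySem.Str.isIn "_memory" t)
  let rest := tables.filter (fun t => !PySem.Str.isIn "_memory" t)
  let learning := rest.filter (fun t => PySem.Str.isIn "_learning" t)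
  let rest2 := rest.filter (fun t => !PySem.Str.isIn "_learning" t)
  let indicators := rest2.filter (fun t => PySem.Str.isIn "_indicators" t || t == "indicator_metadata")
  let rest3 := rest2.filter (fun t => !PySem.Str.isIn "_indicators" t && t != "indicator_metadata")
  let infrastructure := rest3.filter (fun t => pvInfra.contains t)
  let other := rest3.filter (fun t => !pvInfra.contains t)
  [("memory", memory), ("learning", learning), ("indicators", indicators),
   ("infrastructure", infrastructure), ("other", other)]

-- ===== PRECONDITION & SPEC =====
def Spec_categorize_tables (tables : List String) (out : List (String × List String)) : Prop := out = categorize_tables_alt tables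
instance (tables : List String) (out : List (String × List String)) : Decidable (Spec_categorize_tables tables out) := by unfold Spec_categorize_tables; infer_instance

-- ===== CLAIM (what is proved, stated in full; the proofs are below) =====
def Claim_equal_categorize_tables : Prop := ∀ (tables : List String), Dom_categorize_tables tables → Spec_categorize_tables tables (categorize_tables tables)

-- ===== LEMMAS AND PROOFS =====
-- the accumulator dict of A's loop, with explicit bucket contents
def pvDictOf (m l i f o : List String) : PySem.Dict String (List String) :=
  ((((PySem.Dict.empty.insert "memory" m).insert "learning" l).insert
      "indicators" i).insert "infrastructure" f).insert "other" o

theorem pvStepA_dictOf (m l i f o : List String) (t : String) :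
    pvStepA (pvDictOf m l i f o) t =
      if PySem.Str.isIn "_memory" t then pvDictOf (m ++ [t]) l i f o
      else if PySem.Str.isIn "_learning" t then pvDictOf m (l ++ [t]) i f o
      else if PySem.Str.isIn "_indicators" t || t == "indicator_metadata" then
        pvDictOf m l (i ++ [t]) f o
      else if pvInfra.contains t then pvDictOf m l i (f ++ [t]) o
      else pvDictOf m l i f (o ++ [t]) := by
  simp only [pvStepA, pvDictOf, pvInfra]
  split_ifs <;> rfl

theorem pvFoldA_dictOf (tables : List String) (m l i f o : List String) :
    tables.foldl pvStepA (pvDictOf m l i f o) =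
      pvDictOf (m ++ tables.filter (fun t => PySem.Str.isIn "_memory" t))
        (l ++ tables.filter (fun t => !PySem.Str.isIn "_memory" t && PySem.Str.isIn "_learning" t))
        (i ++ tables.filter (fun t => !PySem.Str.isIn "_memory" t && !PySem.Str.isIn "_learning" t &&
              (PySem.Str.isIn "_indicators" t || t == "indicator_metadata")))
        (f ++ tables.filter (fun t => !PySem.Str.isIn "_memory" t && !PySem.Str.isIn "_learning" t &&
              !(PySem.Str.isIn "_indicators" t || t == "indicator_metadata") && pvInfra.contains t))
        (o ++ tables.filter (fun t => !PySem.Str.isIn "_memory" t && !PySem.Str.isIn "_learning" t &&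
              !(PySem.Str.isIn "_indicators" t || t == "indicator_metadata") && !pvInfra.contains t)) := by
  induction tables generalizing m l i f o with
  | nil => simp
  | cons t ts ih =>
    simp only [List.foldl_cons, pvStepA_dictOf, List.filter_cons]
    rcases h1 : PySem.Str.isIn "_memory" t with _ | _ <;>
      rcases h2 : PySem.Str.isIn "_learning" t with _ | _ <;>
        rcases h3 : (PySem.Str.isIn "_indicators" t || t == "indicator_metadata") with _ | _ <;>
          rcases h4 : pvInfra.contains t with _ | _ <;>
            simp [ih]

theorem pvDictOf_items (m l i f o : List String) :
    (pvDictOf m l i f o).items =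
      [("memory", m), ("learning", l), ("indicators", i), ("infrastructure", f), ("other", o)] := by
  simp [pvDictOf, PySem.Dict.insert, PySem.Dict.empty, PySem.Dict.contains]

-- ===== VERDICT (by name: the statement is the Claim_ definition above) =====
theorem categorize_tables_spec : Claim_equal_categorize_tables := by
  intro tables _
  unfold Spec_categorize_tables categorize_tables categorize_tables_alt
  have hinit : pvInitA = pvDictOf [] [] [] [] [] := rfl
  rw [hinit, pvFoldA_dictOf, pvDictOf_items]
  simp only [List.nil_append, List.filter_filter, List.cons.injEq, Prod.mk.injEq, true_and, and_true]
  refine ⟨?_, ?_, ?_, ?_⟩ <;> apply List.filter_congr <;> intro t _ <;>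
    cases PySem.Str.isIn "_memory" t <;> cases PySem.Str.isIn "_learning" t <;>
      cases h : (PySem.Str.isIn "_indicators" t || t == "indicator_metadata") <;> simp_all
  all_goals
    rintro _ hi
    rcases h with h | h
    · rw [h] at hi; cases hi
    · exact h
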